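-- pv_equiv track=rewrite | github.com/jayers99/praxis-ai | src/praxis/application/opinions_service.py | compute_resolution_chain
-- ===== SOURCE A (Python) =====
-- def compute_resolution_chain(
--     domain: str,
--     stage: str | None = None,
--     subtype: str | None = None,
-- ) -> list[str]:
--     """Compute the ordered list of opinion file paths to resolve.
--
--     Resolution order (general → specific):
--     1. _shared/first-principles.md
--     2. {domain}/README.md
--     3. {domain}/principles.md
--     4. {domain}/{stage}.md (if stage provided)
--     5. {domain}/subtypes/{subtype}/README.md (if subtype provided)
--     6. {domain}/subtypes/{subtype}/principles.md (if subtype provided)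
--     7. {domain}/subtypes/{subtype}/{stage}.md (if both provided)
--
--     For nested subtypes (e.g., "cli-python"), each level is resolved:
--     - subtypes/cli/README.md, subtypes/cli/principles.md, subtypes/cli/{stage}.md
--     - subtypes/cli/python/README.md, subtypes/cli/python/principles.md, ...
--
--     Args:
--         domain: The domain (code, create, write, learn, observe)
--         stage: Optional lifecycle stage
--         subtype: Optional subtype (may be nested with hyphens or dots)
--
--     Returns:
--         Ordered list of relative paths to check
--     """
--     paths: list[str] = []
--
--     # 1. Shared principles (always apply)
--     paths.append("_shared/first-principles.md")
--
--     # 2. Domain level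
--     paths.append(f"{domain}/README.md")
--     paths.append(f"{domain}/principles.md")
--
--     # 3. Domain stage (if provided)
--     if stage:
--         paths.append(f"{domain}/{stage}.md")
--
--     # 4. Subtype chain (if provided)
--     if subtype:
--         # Handle nested subtypes per opinions-contract.md section 5.1:
--         # Both "cli-python" (hyphen) and "cli.python" (dot) → ["cli", "python"]
--         segments = subtype.replace(".", "-").split("-")
--         accumulated = f"{domain}/subtypes"
--
--         for segment in segments:
--             accumulated = f"{accumulated}/{segment}"
--             paths.append(f"{accumulated}/README.md")
--             paths.append(f"{accumulated}/principles.md")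
--             if stage:
--                 paths.append(f"{accumulated}/{stage}.md")
--
--     return paths
-- ===== SOURCE B (Python) =====
-- def compute_resolution_chain(
--     domain: str,
--     stage: str | None = None,
--     subtype: str | None = None,
-- ) -> list[str]:
--     # First build the ordered directory list, then one uniform emit loop.
--     dirs = [domain]
--     if subtype:
--         acc = f"{domain}/subtypes"
--         for seg in subtype.replace(".", "-").split("-"):
--             acc = f"{acc}/{seg}"
--             dirs.append(acc)
--     chain = ["_shared/first-principles.md"]
--     for d in dirs:
--         chain.append(f"{d}/README.md")
--         chain.append(f"{d}/principles.md")
--         if stage: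
--             chain.append(f"{d}/{stage}.md")
--     return chain
-- ===== Notes on version B (the rewrite author's own statement) =====
-- stated objective: simpler
-- what changed: B first builds the ordered directory list (domain plus cumulative subtype prefixes) and then emits README/principles/stage files in one uniform loop over it, instead of A's inline domain handling followed by a separate subtype loop that emits files while accumulating.
import Mathlib
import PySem

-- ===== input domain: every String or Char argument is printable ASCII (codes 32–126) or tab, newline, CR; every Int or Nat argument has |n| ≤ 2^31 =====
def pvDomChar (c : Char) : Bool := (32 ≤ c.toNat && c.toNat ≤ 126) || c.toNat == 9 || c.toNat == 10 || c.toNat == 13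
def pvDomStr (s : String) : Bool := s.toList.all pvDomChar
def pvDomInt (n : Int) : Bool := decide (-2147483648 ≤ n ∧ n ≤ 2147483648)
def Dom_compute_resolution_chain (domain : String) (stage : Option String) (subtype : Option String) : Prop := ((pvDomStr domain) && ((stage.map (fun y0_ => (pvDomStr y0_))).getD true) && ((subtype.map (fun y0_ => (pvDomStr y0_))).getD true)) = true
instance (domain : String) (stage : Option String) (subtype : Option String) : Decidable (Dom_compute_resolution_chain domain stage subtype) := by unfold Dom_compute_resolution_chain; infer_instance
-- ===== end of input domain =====

-- B builds the ordered directory list first and then emits the three file names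
-- in one uniform loop over it (objective: simpler decomposition); same return value as A.

-- ===== PORT A =====
-- A's loop body: accumulate the subtype prefix and append README/principles/(stage) to paths
def pvA_step (domain_stage : String) (acc : String × List String) (segment : String) : String × List String :=
  let a := acc.1 ++ "/" ++ segment
  (a, (acc.2 ++ [a ++ "/README.md", a ++ "/principles.md"]) ++
      (if domain_stage ≠ "" then [a ++ "/" ++ domain_stage ++ ".md"] else []))

def compute_resolution_chain (domain : String) (stage : Option String) (subtype : Option String) : List String :=
  let st := stage.getD ""
  let paths : List String := ["_shared/first-principles.md"]
  let paths := paths ++ [domain ++ "/README.md", domain ++ "/principles.md"]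
  let paths := if st ≠ "" then paths ++ [domain ++ "/" ++ st ++ ".md"] else paths
  let sub := subtype.getD ""
  if sub ≠ "" then
    let segments := (PySem.Str.split? (PySem.Str.replace sub "." "-") "-").getD []
    (segments.foldl (pvA_step st) (domain ++ "/subtypes", paths)).2
  else paths

-- ===== PORT B =====
-- B's first loop body: accumulate the prefix and collect the directory
def pvB_dirstep (acc : String × List String) (seg : String) : String × List String :=
  let a := acc.1 ++ "/" ++ seg
  (a, acc.2 ++ [a])

-- B's second loop body: emit the files for one directory
def pvB_emit (st : String) (chain : List String) (d : String) : List String :=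
  (chain ++ [d ++ "/README.md", d ++ "/principles.md"]) ++
    (if st ≠ "" then [d ++ "/" ++ st ++ ".md"] else [])

def compute_resolution_chain_alt (domain : String) (stage : Option String) (subtype : Option String) : List String :=
  let sub := subtype.getD ""
  let dirs : List String := [domain]
  let dirs := if sub ≠ "" then
      dirs ++ (((PySem.Str.split? (PySem.Str.replace sub "." "-") "-").getD []).foldl
        pvB_dirstep (domain ++ "/subtypes", [])).2
    else dirs
  dirs.foldl (pvB_emit (stage.getD "")) ["_shared/first-principles.md"]

-- ===== PRECONDITION & SPEC =====
def Spec_compute_resolution_chain (domain : String) (stage : Option String) (subtype : Option String) (out : List String) : Prop := out = compute_resolution_chain_alt domain stage subtype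
instance (domain : String) (stage : Option String) (subtype : Option String) (out : List String) : Decidable (Spec_compute_resolution_chain domain stage subtype out) := by unfold Spec_compute_resolution_chain; infer_instance

-- ===== CLAIM (what is proved, stated in full; the proofs are below) =====
def Claim_equal_compute_resolution_chain : Prop := ∀ (domain : String) (stage : Option String) (subtype : Option String), Dom_compute_resolution_chain domain stage subtype → Spec_compute_resolution_chain domain stage subtype (compute_resolution_chain domain stage subtype)

-- ===== LEMMAS AND PROOFS =====

-- B's directory fold with initial list l prepends l
theorem pvB_dirs_shift (segs : List String) (acc : String) (l : List String) :
    (segs.foldl pvB_dirstep (acc, l)).2 = l ++ (segs.foldl pvB_dirstep (acc, [])).2 := by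
  induction segs generalizing acc l with
  | nil => simp
  | cons s segs ih =>
    simp only [List.foldl_cons, pvB_dirstep, List.nil_append]
    rw [ih (acc ++ "/" ++ s) (l ++ [acc ++ "/" ++ s]),
        ih (acc ++ "/" ++ s) [acc ++ "/" ++ s]]
    simp

-- A's subtype fold = B's emit fold over B's directory list
theorem pvA_fold_eq (st : String) (segs : List String) (acc : String) (paths : List String) :
    (segs.foldl (pvA_step st) (acc, paths)).2 =
      ((segs.foldl pvB_dirstep (acc, [])).2).foldl (pvB_emit st) paths := by
  induction segs generalizing acc paths with
  | nil => simp
  | cons s segs ih =>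
    simp only [List.foldl_cons, pvA_step, pvB_dirstep, List.nil_append]
    rw [ih, pvB_dirs_shift segs (acc ++ "/" ++ s) [acc ++ "/" ++ s]]
    simp [pvB_emit]

-- ===== VERDICT (by name: the statement is the Claim_ definition above) =====
theorem compute_resolution_chain_spec : Claim_equal_compute_resolution_chain := by
  intro domain stage subtype _
  unfold Spec_compute_resolution_chain compute_resolution_chain compute_resolution_chain_alt
  by_cases hsub : subtype.getD "" ≠ "" <;>
    by_cases hst : stage.getD "" ≠ "" <;>
      simp [hsub, hst, pvA_fold_eq, pvB_emit]
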